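-- pv_equiv track=rewrite | github.com/gurudewan/core-video-gpt | helpers/highlights_helper.py | remove_smaller_intervals
-- ===== SOURCE A (Python) =====
-- def remove_smaller_intervals(transcript_highlights):
--     i = 0
--     while i < len(transcript_highlights) - 1:
--         if transcript_highlights[i][0] == transcript_highlights[i + 1][0]:
--             if (transcript_highlights[i][1] - transcript_highlights[i][0]) < (
--                 transcript_highlights[i + 1][1] - transcript_highlights[i + 1][0]
--             ):
--                 transcript_highlights.pop(i)
--             else:
--                 transcript_highlights.pop(i + 1)
--         else:
--             i += 1
--     return transcript_highlights
-- ===== SOURCE B (Python) =====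
-- def remove_smaller_intervals(transcript_highlights):
--     # Single left-to-right pass: within each run of consecutive intervals sharing
--     # a start, keep the one with the largest duration (ties keep the earliest).
--     # Note: unlike A, this builds a new list instead of mutating the argument.
--     result = []
--     for item in transcript_highlights:
--         if result and result[-1][0] == item[0]:
--             if item[1] - item[0] > result[-1][1] - result[-1][0]:
--                 result[-1] = item
--         else:
--             result.append(item)
--     return result
-- ===== Notes on version B (the rewrite author's own statement) =====
-- stated objective: simpler
-- what changed: Replaces the in-place while-loop with repeated list.pop by a single left-to-right pass that builds a new result list, keeping the larger-duration interval per run of consecutive equal starts (ties keep the earlier one).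
import Mathlib
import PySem

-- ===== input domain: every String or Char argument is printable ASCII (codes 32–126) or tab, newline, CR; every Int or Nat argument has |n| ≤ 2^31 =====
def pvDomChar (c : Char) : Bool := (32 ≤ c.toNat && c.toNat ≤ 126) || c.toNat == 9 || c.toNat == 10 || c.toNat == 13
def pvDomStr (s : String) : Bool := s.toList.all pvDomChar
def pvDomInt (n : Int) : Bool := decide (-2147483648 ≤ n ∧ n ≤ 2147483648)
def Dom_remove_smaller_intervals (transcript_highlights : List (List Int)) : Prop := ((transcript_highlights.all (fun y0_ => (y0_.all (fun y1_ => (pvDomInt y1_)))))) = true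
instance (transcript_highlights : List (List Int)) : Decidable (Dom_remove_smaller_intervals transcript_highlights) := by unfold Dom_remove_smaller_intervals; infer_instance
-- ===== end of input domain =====

-- B keeps, per run of consecutive equal-start intervals, the largest-duration one (ties: earliest),
-- in a single forward pass instead of A's index-and-pop while-loop. A mutates its argument in
-- place and returns it; B returns a fresh list — the equivalence is about the RETURN value only.

-- ===== PORT A =====
-- hl[0] / hl[1]: Python indexing; .getD 0 is only reached where Python would raise
-- IndexError, and Pre_ excludes exactly those inputs.
def pvFst (l : List Int) : Int := (PySem.List.pyGet? l 0).getD 0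
def pvSnd (l : List Int) : Int := (PySem.List.pyGet? l 1).getD 0

-- the while-loop of A: state is the (mutated) list and the index i; list.pop(k) = eraseIdx k.
-- fuel only makes the recursion structural: every iteration pops an element or advances i,
-- so fuel = 2 * length is never exhausted and this is the Python loop verbatim.
def loopA : Nat → List (List Int) → Nat → List (List Int)
  | 0, xs, _ => xs
  | fuel + 1, xs, i =>
    if h : i + 1 < xs.length then
      let a := xs[i]'(Nat.lt_of_succ_lt h)
      let b := xs[i + 1]'h
      if pvFst a = pvFst b then
        if pvSnd a - pvFst a < pvSnd b - pvFst b then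
          loopA fuel (xs.eraseIdx i) i
        else
          loopA fuel (xs.eraseIdx (i + 1)) i
      else
        loopA fuel xs (i + 1)
    else xs

def remove_smaller_intervals (transcript_highlights : List (List Int)) : List (List Int) :=
  loopA (2 * transcript_highlights.length) transcript_highlights 0

-- ===== PORT B =====
-- one fold step: compare the item with the last element of the result built so far
def stepB (res : List (List Int)) (item : List Int) : List (List Int) :=
  match res.getLast? with
  | none => res ++ [item]
  | some last =>
    if pvFst last = pvFst item then
      if pvSnd item - pvFst item > pvSnd last - pvFst last then
        res.dropLast ++ [item]      -- result[-1] = item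
      else res
    else res ++ [item]

def remove_smaller_intervals_alt (transcript_highlights : List (List Int)) : List (List Int) :=
  transcript_highlights.foldl stepB []

-- ===== PRECONDITION & SPEC =====
-- A raises IndexError exactly when two adjacent inner lists include an empty one, or share a
-- first element while one of them has no second element; Pre_ admits exactly the inputs on
-- which the Python A returns.
def Pre_remove_smaller_intervals (transcript_highlights : List (List Int)) : Prop :=
  ∀ p ∈ transcript_highlights.zip transcript_highlights.tail,
    1 ≤ p.1.length ∧ 1 ≤ p.2.length ∧
      (p.1.headD 0 = p.2.headD 0 → 2 ≤ p.1.length ∧ 2 ≤ p.2.length)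
instance (transcript_highlights : List (List Int)) : Decidable (Pre_remove_smaller_intervals transcript_highlights) := by unfold Pre_remove_smaller_intervals; infer_instance

def pvWitness_remove_smaller_intervals : List (List Int) := [[1, 3], [1, 9], [2, 4]]

def Spec_remove_smaller_intervals (transcript_highlights : List (List Int)) (out : List (List Int)) : Prop := out = remove_smaller_intervals_alt transcript_highlights
instance (transcript_highlights : List (List Int)) (out : List (List Int)) : Decidable (Spec_remove_smaller_intervals transcript_highlights out) := by unfold Spec_remove_smaller_intervals; infer_instance

-- ===== CLAIM (what is proved, stated in full; the proofs are below) =====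
def Claim_equal_remove_smaller_intervals : Prop := ∀ (transcript_highlights : List (List Int)), Dom_remove_smaller_intervals transcript_highlights → Pre_remove_smaller_intervals transcript_highlights → Spec_remove_smaller_intervals transcript_highlights (remove_smaller_intervals transcript_highlights)

-- ===== LEMMAS AND PROOFS =====

-- canonical recursive description both ports are reduced to
def canon : List (List Int) → List (List Int)
  | [] => []
  | [a] => [a]
  | a :: b :: rest =>
    if pvFst a = pvFst b then
      if pvSnd a - pvFst a < pvSnd b - pvFst b then canon (b :: rest)
      else canon (a :: rest)
    else a :: canon (b :: rest)

lemma foldl_stepB_eq (l : List (List Int)) :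
    ∀ (a : List Int) (ys : List (List Int)),
      List.foldl stepB (ys ++ [a]) l = ys ++ canon (a :: l) := by
  induction l with
  | nil => intro a ys; simp [canon]
  | cons x l ih =>
    intro a ys
    rw [List.foldl_cons]
    have hstep : stepB (ys ++ [a]) x =
        if pvFst a = pvFst x then
          if pvSnd x - pvFst x > pvSnd a - pvFst a then (ys ++ [a]).dropLast ++ [x]
          else ys ++ [a]
        else (ys ++ [a]) ++ [x] := by
      rw [stepB.eq_def]
      rw [show (ys ++ [a]).getLast? = some a from by simp]
    by_cases h1 : pvFst a = pvFst x
    · by_cases h2 : pvSnd a - pvFst a < pvSnd x - pvFst x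
      · rw [hstep, if_pos h1, if_pos h2, List.dropLast_concat,
          ih x ys, canon, if_pos h1, if_pos h2]
      · rw [hstep, if_pos h1, if_neg h2, ih a ys, canon, if_pos h1, if_neg h2]
    · rw [hstep, if_neg h1, ih x (ys ++ [a]), canon, if_neg h1]
      simp

lemma alt_eq_canon (t : List (List Int)) :
    remove_smaller_intervals_alt t = canon t := by
  cases t with
  | nil => simp [remove_smaller_intervals_alt, canon]
  | cons x l =>
    have hx : stepB [] x = [x] := by rw [stepB.eq_def]; rfl
    simp only [remove_smaller_intervals_alt, List.foldl_cons, hx]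
    simpa using foldl_stepB_eq l x []

-- A's loop invariant: the already-scanned prefix ends in an interval whose start differs
-- from the start of the first unscanned interval.
lemma loopA_eq (fuel : Nat) :
    ∀ (post pre : List (List Int)), post.length ≤ fuel →
      (∀ x y, pre.getLast? = some x → post.head? = some y → pvFst x ≠ pvFst y) →
      loopA fuel (pre ++ post) pre.length = pre ++ canon post := by
  induction fuel with
  | zero =>
    intro post pre hlen _
    have : post = [] := List.length_eq_zero_iff.mp (Nat.le_zero.mp hlen)
    subst this
    simp [loopA, canon]
  | succ n ih =>
    intro post pre hlen hrel
    match post with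
    | [] => rw [loopA]; rw [dif_neg (by simp)]; simp [canon]
    | [a] => rw [loopA]; rw [dif_neg (by simp)]; simp [canon]
    | a :: b :: rest =>
      have hget1 : (pre ++ a :: b :: rest)[pre.length]'(by simp) = a := by simp
      have hget2 : (pre ++ a :: b :: rest)[pre.length + 1]'(by simp) = b := by
        rw [List.getElem_append_right (by omega)]
        simp
      rw [loopA, dif_pos (by simp)]
      simp only [hget1, hget2]
      simp only [List.length_cons] at hlen
      by_cases h1 : pvFst a = pvFst b
      · by_cases h2 : pvSnd a - pvFst a < pvSnd b - pvFst b
        · rw [if_pos h1, if_pos h2]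
          have herase : (pre ++ a :: b :: rest).eraseIdx pre.length = pre ++ b :: rest := by
            rw [List.eraseIdx_append_of_length_le (by omega)]
            simp
          have hrel' : ∀ x y, pre.getLast? = some x → (b :: rest).head? = some y →
              pvFst x ≠ pvFst y := by
            intro x y hx hy
            simp only [List.head?_cons, Option.some.injEq] at hy
            subst hy
            rw [← h1]
            exact hrel x a hx rfl
          rw [herase, ih (b :: rest) pre (by simp only [List.length_cons]; omega) hrel',
            canon, if_pos h1, if_pos h2]
        · rw [if_pos h1, if_neg h2]
          have herase : (pre ++ a :: b :: rest).eraseIdx (pre.length + 1) = pre ++ a :: rest := by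
            rw [List.eraseIdx_append_of_length_le (by omega)]
            simp [List.eraseIdx]
          have hrel' : ∀ x y, pre.getLast? = some x → (a :: rest).head? = some y →
              pvFst x ≠ pvFst y := by
            intro x y hx hy
            simp only [List.head?_cons, Option.some.injEq] at hy
            subst hy
            exact hrel x a hx rfl
          rw [herase, ih (a :: rest) pre (by simp only [List.length_cons]; omega) hrel',
            canon, if_pos h1, if_neg h2]
      · rw [if_neg h1]
        have hrel' : ∀ x y, (pre ++ [a]).getLast? = some x → (b :: rest).head? = some y →
            pvFst x ≠ pvFst y := by
          intro x y hx hy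
          simp only [List.getLast?_concat, Option.some.injEq] at hx
          simp only [List.head?_cons, Option.some.injEq] at hy
          subst hx; subst hy
          exact h1
        have hre : pre ++ a :: b :: rest = (pre ++ [a]) ++ b :: rest := by simp
        have hidx : pre.length + 1 = (pre ++ [a]).length := by simp
        rw [hre, hidx, ih (b :: rest) (pre ++ [a]) (by simp only [List.length_cons]; omega) hrel',
          canon, if_neg h1]
        simp

lemma a_eq_canon (t : List (List Int)) :
    remove_smaller_intervals t = canon t := by
  have h := loopA_eq (2 * t.length) t [] (by omega) (by intro x y hx _; simp at hx)
  simpa using h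

-- ===== VERDICT (by name: the statement is the Claim_ definition above) =====
theorem remove_smaller_intervals_spec : Claim_equal_remove_smaller_intervals := by
  intro t _ _
  unfold Spec_remove_smaller_intervals
  rw [a_eq_canon, alt_eq_canon]
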